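-- pv_equiv track=rewrite | github.com/maikleProko/akira-bot | scenarios/parsers/arbitrage_parser/rolling_arbitrage_parser/core/abstract_arbitrage_parser.py | _split_symbol
-- ===== SOURCE A (Python) =====
-- from typing import Dict, Tuple, Optional, List
--
-- def _split_symbol(symbol: str) -> Tuple[Optional[str], Optional[str]]:
--     """
--     Разбивает символ на base и quote.
--     Поддерживает форматы: BTCUSDT, BTC/USDT, BTC-USDT и т.д.
--     """
--     symbol = symbol.replace('/', '').replace('-', '').upper()
--     for sep in ['USDT', 'USDC', 'USD', 'BTC', 'ETH', 'BNB', 'EUR']: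
--         if symbol.endswith(sep):
--             base = symbol[:-len(sep)]
--             quote = sep
--             return base, quote
--     return None, None
-- ===== SOURCE B (Python) =====
-- _QUOTES = ['USDT', 'USDC', 'USD', 'BTC', 'ETH', 'BNB', 'EUR']
--
--
-- def _build_trie():
--     # Trie over the REVERSED quote strings, flattened into a transition
--     # table: (state, char) -> state, plus an accepting map state -> quote.
--     # Since no quote is a suffix of another, at most one accepting state is
--     # reachable while consuming a symbol's suffix, so the first accept found
--     # is the unique (hence A-compatible) match.
--     trans = {}
--     accept = {}
--     next_state = 1
--     for q in _QUOTES: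
--         state = 0
--         for ch in reversed(q):
--             key = (state, ch)
--             if key not in trans:
--                 trans[key] = next_state
--                 next_state += 1
--             state = trans[key]
--         accept[state] = q
--     return trans, accept
--
--
-- _TRANS, _ACCEPT = _build_trie()
--
--
-- def _split_symbol(symbol):
--     symbol = symbol.replace('/', '').replace('-', '').upper()
--     state = 0
--     for k, ch in enumerate(reversed(symbol)):
--         state = _TRANS.get((state, ch))
--         if state is None:
--             return None, None
--         quote = _ACCEPT.get(state)
--         if quote is not None:
--             return symbol[:len(symbol) - k - 1], quote
--     return None, None
-- ===== Notes on version B (the rewrite author's own statement) =====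
-- stated objective: alternative
-- what changed: Replaces A's sequential endswith scan over seven quote strings by a trie built once over the reversed quotes (flattened into a (state,char)->state transition table plus an accepting map) and run character by character from the end of the normalized symbol; this is correct because no quote is a suffix of another, so the first accepting state reached is the unique match A would find.
import Mathlib
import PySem

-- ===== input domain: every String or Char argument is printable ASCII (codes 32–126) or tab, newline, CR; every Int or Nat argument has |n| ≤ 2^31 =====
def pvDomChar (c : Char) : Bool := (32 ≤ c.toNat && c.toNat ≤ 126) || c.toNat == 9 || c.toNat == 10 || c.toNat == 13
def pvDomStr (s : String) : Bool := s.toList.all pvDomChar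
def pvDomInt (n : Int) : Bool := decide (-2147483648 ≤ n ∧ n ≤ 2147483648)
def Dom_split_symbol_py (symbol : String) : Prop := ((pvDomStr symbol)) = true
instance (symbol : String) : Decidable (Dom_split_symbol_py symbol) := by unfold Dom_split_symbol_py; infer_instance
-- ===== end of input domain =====

-- B replaces A's sequential endswith scan over seven quote strings by a trie over the
-- reversed quotes, flattened to a transition table, run char-by-char from the string's
-- end (alternative algorithm, same cost).

-- ===== PORT A =====
def pvALoop (s : String) : List String → Option String × Option String
  | [] => (none, none)
  | sep :: rest =>
    if PySem.Str.endswith s sep then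
      (some (PySem.Str.slice s none (some (-(PySem.Str.len sep : Int)))), some sep)
    else pvALoop s rest

def split_symbol_py (symbol : String) : Option String × Option String :=
  let s := PySem.Str.upper (PySem.Str.replace (PySem.Str.replace symbol "/" "") "-" "")
  pvALoop s ["USDT", "USDC", "USD", "BTC", "ETH", "BNB", "EUR"]

-- ===== PORT B =====
def pvQuotes : List String := ["USDT", "USDC", "USD", "BTC", "ETH", "BNB", "EUR"]

-- port of _build_trie: fold over the quotes, inner fold over each reversed quote
def pvBuildTrie : PySem.Dict (Int × Char) Int × PySem.Dict Int String :=
  let res := pvQuotes.foldl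
    (fun (acc : PySem.Dict (Int × Char) Int × PySem.Dict Int String × Int) q =>
      let inner := q.toList.reverse.foldl
        (fun (tsn : PySem.Dict (Int × Char) Int × Int × Int) ch =>
          if PySem.Dict.contains tsn.1 (tsn.2.1, ch) then
            (tsn.1, PySem.Dict.getD tsn.1 (tsn.2.1, ch) 0, tsn.2.2)
          else
            (PySem.Dict.insert tsn.1 (tsn.2.1, ch) tsn.2.2, tsn.2.2, tsn.2.2 + 1))
        (acc.1, (0 : Int), acc.2.2)
      (inner.1, PySem.Dict.insert acc.2.1 inner.2.1 q, inner.2.2))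
    (PySem.Dict.empty, PySem.Dict.empty, 1)
  (res.1, res.2.1)

def pvTrans : PySem.Dict (Int × Char) Int := pvBuildTrie.1
def pvAccept : PySem.Dict Int String := pvBuildTrie.2

def pvRun (s : String) (state : Int) (k : Int) : List Char → Option String × Option String
  | [] => (none, none)
  | ch :: rest =>
    match PySem.Dict.get? pvTrans (state, ch) with
    | none => (none, none)
    | some st =>
      match PySem.Dict.get? pvAccept st with
      | some q => (some (PySem.Str.slice s none (some ((PySem.Str.len s : Int) - k - 1))), some q)
      | none => pvRun s st (k + 1) rest

def split_symbol_py_alt (symbol : String) : Option String × Option String :=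
  let s := PySem.Str.upper (PySem.Str.replace (PySem.Str.replace symbol "/" "") "-" "")
  pvRun s 0 0 s.toList.reverse

-- ===== PRECONDITION & SPEC =====
def Spec_split_symbol_py (symbol : String) (out : Option String × Option String) : Prop := out = split_symbol_py_alt symbol
instance (symbol : String) (out : Option String × Option String) : Decidable (Spec_split_symbol_py symbol out) := by unfold Spec_split_symbol_py; infer_instance

-- ===== CLAIM (what is proved, stated in full; the proofs are below) =====
def Claim_equal_split_symbol_py : Prop := ∀ (symbol : String), Dom_split_symbol_py symbol → Spec_split_symbol_py symbol (split_symbol_py symbol)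

-- ===== LEMMAS AND PROOFS =====

lemma chars_endswith_eq (l p : List Char) :
    PySem.Chars.endswith l p = p.reverse.isPrefixOf l.reverse := by
  rw [Bool.eq_iff_iff, PySem.Chars.endswith_iff, List.isPrefixOf_iff_prefix, List.reverse_prefix]

lemma slice_neg_eq (s : String) (k : ℕ) (hk : 0 < k) (hl : k ≤ s.toList.length) :
    PySem.Str.slice s none (some ((s.toList.length : Int) - k)) =
      PySem.Str.slice s none (some (-(k : Int))) := by
  apply String.toList_inj.mp
  rw [PySem.Str.toList_slice, PySem.Str.toList_slice,
      PySem.Chars.slice_eq_listSlice, PySem.Chars.slice_eq_listSlice,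
      PySem.List.slice_to_neg_natCast _ k hk,
      PySem.List.slice_to _ (by omega)]
  congr 1
  omega

lemma slice_eq2 (s : String) (k : ℕ) (i j : Int) (hk : 0 < k) (hkl : k ≤ s.toList.length)
    (hi : i = -(k : Int)) (hj : j = (s.toList.length : Int) - k) :
    PySem.Str.slice s none (some i) = PySem.Str.slice s none (some j) := by
  subst hi hj
  rw [slice_neg_eq s k hk hkl]

set_option maxHeartbeats 1000000 in
lemma main_eq (s : String) :
    pvALoop s ["USDT", "USDC", "USD", "BTC", "ETH", "BNB", "EUR"] = pvRun s 0 0 s.toList.reverse := by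
  have hT : pvTrans = PySem.Dict.mk [((0, 'T'), 1), ((1, 'D'), 2), ((2, 'S'), 3), ((3, 'U'), 4), ((0, 'C'), 5), ((5, 'D'), 6), ((6, 'S'), 7), ((7, 'U'), 8), ((0, 'D'), 9), ((9, 'S'), 10), ((10, 'U'), 11), ((5, 'T'), 12), ((12, 'B'), 13), ((0, 'H'), 14), ((14, 'T'), 15), ((15, 'E'), 16), ((0, 'B'), 17), ((17, 'N'), 18), ((18, 'B'), 19), ((0, 'R'), 20), ((20, 'U'), 21), ((21, 'E'), 22)] := by decide
  have hA : pvAccept = PySem.Dict.mk [(4, "USDT"), (8, "USDC"), (11, "USD"), (13, "BTC"), (16, "ETH"), (19, "BNB"), (22, "EUR")] := by decide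
  have hsl : s.toList.length = s.length := by simp
  rcases h : s.toList.reverse with _ | ⟨a, _ | ⟨b, _ | ⟨c, _ | ⟨d, rest⟩⟩⟩⟩
  · simp [pvALoop, pvRun, chars_endswith_eq, h, List.isPrefixOf, hT, hA, PySem.Dict.get?, Prod.mk.injEq]
  · have hL := congrArg List.length h
    simp at hL
    by_cases h0_0 : 'T' = a
    · subst h0_0
      simp [pvALoop, pvRun, chars_endswith_eq, h, List.isPrefixOf, hT, hA, PySem.Dict.get?, Prod.mk.injEq]
    by_cases h0_1 : 'C' = a
    · subst h0_1
      simp [pvALoop, pvRun, chars_endswith_eq, h, List.isPrefixOf, hT, hA, PySem.Dict.get?, Prod.mk.injEq, h0_0]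
    by_cases h0_2 : 'D' = a
    · subst h0_2
      simp [pvALoop, pvRun, chars_endswith_eq, h, List.isPrefixOf, hT, hA, PySem.Dict.get?, Prod.mk.injEq, h0_0, h0_1]
    by_cases h0_3 : 'H' = a
    · subst h0_3
      simp [pvALoop, pvRun, chars_endswith_eq, h, List.isPrefixOf, hT, hA, PySem.Dict.get?, Prod.mk.injEq, h0_0, h0_1, h0_2]
    by_cases h0_4 : 'B' = a
    · subst h0_4
      simp [pvALoop, pvRun, chars_endswith_eq, h, List.isPrefixOf, hT, hA, PySem.Dict.get?, Prod.mk.injEq, h0_0, h0_1, h0_2, h0_3]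
    by_cases h0_5 : 'R' = a
    · subst h0_5
      simp [pvALoop, pvRun, chars_endswith_eq, h, List.isPrefixOf, hT, hA, PySem.Dict.get?, Prod.mk.injEq, h0_0, h0_1, h0_2, h0_3, h0_4]
    simp [pvALoop, pvRun, chars_endswith_eq, h, List.isPrefixOf, hT, hA, PySem.Dict.get?, Prod.mk.injEq, h0_0, h0_1, h0_2, h0_3, h0_4, h0_5]
  · have hL := congrArg List.length h
    simp at hL
    by_cases h0_0 : 'T' = a
    · subst h0_0
      by_cases h1_0 : 'D' = b
      · subst h1_0
        simp [pvALoop, pvRun, chars_endswith_eq, h, List.isPrefixOf, hT, hA, PySem.Dict.get?, Prod.mk.injEq]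
      simp [pvALoop, pvRun, chars_endswith_eq, h, List.isPrefixOf, hT, hA, PySem.Dict.get?, Prod.mk.injEq, h1_0]
    by_cases h0_1 : 'C' = a
    · subst h0_1
      by_cases h1_0 : 'D' = b
      · subst h1_0
        simp [pvALoop, pvRun, chars_endswith_eq, h, List.isPrefixOf, hT, hA, PySem.Dict.get?, Prod.mk.injEq, h0_0]
      by_cases h1_1 : 'T' = b
      · subst h1_1
        simp [pvALoop, pvRun, chars_endswith_eq, h, List.isPrefixOf, hT, hA, PySem.Dict.get?, Prod.mk.injEq, h0_0, h1_0]
      simp [pvALoop, pvRun, chars_endswith_eq, h, List.isPrefixOf, hT, hA, PySem.Dict.get?, Prod.mk.injEq, h0_0, h1_0, h1_1]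
    by_cases h0_2 : 'D' = a
    · subst h0_2
      by_cases h1_0 : 'S' = b
      · subst h1_0
        simp [pvALoop, pvRun, chars_endswith_eq, h, List.isPrefixOf, hT, hA, PySem.Dict.get?, Prod.mk.injEq, h0_0, h0_1]
      simp [pvALoop, pvRun, chars_endswith_eq, h, List.isPrefixOf, hT, hA, PySem.Dict.get?, Prod.mk.injEq, h0_0, h0_1, h1_0]
    by_cases h0_3 : 'H' = a
    · subst h0_3
      by_cases h1_0 : 'T' = b
      · subst h1_0
        simp [pvALoop, pvRun, chars_endswith_eq, h, List.isPrefixOf, hT, hA, PySem.Dict.get?, Prod.mk.injEq, h0_0, h0_1, h0_2]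
      simp [pvALoop, pvRun, chars_endswith_eq, h, List.isPrefixOf, hT, hA, PySem.Dict.get?, Prod.mk.injEq, h0_0, h0_1, h0_2, h1_0]
    by_cases h0_4 : 'B' = a
    · subst h0_4
      by_cases h1_0 : 'N' = b
      · subst h1_0
        simp [pvALoop, pvRun, chars_endswith_eq, h, List.isPrefixOf, hT, hA, PySem.Dict.get?, Prod.mk.injEq, h0_0, h0_1, h0_2, h0_3]
      simp [pvALoop, pvRun, chars_endswith_eq, h, List.isPrefixOf, hT, hA, PySem.Dict.get?, Prod.mk.injEq, h0_0, h0_1, h0_2, h0_3, h1_0]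
    by_cases h0_5 : 'R' = a
    · subst h0_5
      by_cases h1_0 : 'U' = b
      · subst h1_0
        simp [pvALoop, pvRun, chars_endswith_eq, h, List.isPrefixOf, hT, hA, PySem.Dict.get?, Prod.mk.injEq, h0_0, h0_1, h0_2, h0_3, h0_4]
      simp [pvALoop, pvRun, chars_endswith_eq, h, List.isPrefixOf, hT, hA, PySem.Dict.get?, Prod.mk.injEq, h0_0, h0_1, h0_2, h0_3, h0_4, h1_0]
    simp [pvALoop, pvRun, chars_endswith_eq, h, List.isPrefixOf, hT, hA, PySem.Dict.get?, Prod.mk.injEq, h0_0, h0_1, h0_2, h0_3, h0_4, h0_5]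
  · have hL := congrArg List.length h
    simp at hL
    by_cases h0_0 : 'T' = a
    · subst h0_0
      by_cases h1_0 : 'D' = b
      · subst h1_0
        by_cases h2_0 : 'S' = c
        · subst h2_0
          simp [pvALoop, pvRun, chars_endswith_eq, h, List.isPrefixOf, hT, hA, PySem.Dict.get?, Prod.mk.injEq]
        simp [pvALoop, pvRun, chars_endswith_eq, h, List.isPrefixOf, hT, hA, PySem.Dict.get?, Prod.mk.injEq, h2_0]
      simp [pvALoop, pvRun, chars_endswith_eq, h, List.isPrefixOf, hT, hA, PySem.Dict.get?, Prod.mk.injEq, h1_0]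
    by_cases h0_1 : 'C' = a
    · subst h0_1
      by_cases h1_0 : 'D' = b
      · subst h1_0
        by_cases h2_0 : 'S' = c
        · subst h2_0
          simp [pvALoop, pvRun, chars_endswith_eq, h, List.isPrefixOf, hT, hA, PySem.Dict.get?, Prod.mk.injEq, h0_0]
        simp [pvALoop, pvRun, chars_endswith_eq, h, List.isPrefixOf, hT, hA, PySem.Dict.get?, Prod.mk.injEq, h0_0, h2_0]
      by_cases h1_1 : 'T' = b
      · subst h1_1
        by_cases h2_0 : 'B' = c
        · subst h2_0
          simp [pvALoop, pvRun, chars_endswith_eq, h, List.isPrefixOf, hT, hA, PySem.Dict.get?, Prod.mk.injEq, h0_0, h1_0]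
          refine slice_eq2 s 3 _ _ (by omega) (by omega) (by norm_num) (by push_cast; omega)
        simp [pvALoop, pvRun, chars_endswith_eq, h, List.isPrefixOf, hT, hA, PySem.Dict.get?, Prod.mk.injEq, h0_0, h1_0, h2_0]
      simp [pvALoop, pvRun, chars_endswith_eq, h, List.isPrefixOf, hT, hA, PySem.Dict.get?, Prod.mk.injEq, h0_0, h1_0, h1_1]
    by_cases h0_2 : 'D' = a
    · subst h0_2
      by_cases h1_0 : 'S' = b
      · subst h1_0
        by_cases h2_0 : 'U' = c
        · subst h2_0
          simp [pvALoop, pvRun, chars_endswith_eq, h, List.isPrefixOf, hT, hA, PySem.Dict.get?, Prod.mk.injEq, h0_0, h0_1]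
          refine slice_eq2 s 3 _ _ (by omega) (by omega) (by norm_num) (by push_cast; omega)
        simp [pvALoop, pvRun, chars_endswith_eq, h, List.isPrefixOf, hT, hA, PySem.Dict.get?, Prod.mk.injEq, h0_0, h0_1, h2_0]
      simp [pvALoop, pvRun, chars_endswith_eq, h, List.isPrefixOf, hT, hA, PySem.Dict.get?, Prod.mk.injEq, h0_0, h0_1, h1_0]
    by_cases h0_3 : 'H' = a
    · subst h0_3
      by_cases h1_0 : 'T' = b
      · subst h1_0
        by_cases h2_0 : 'E' = c
        · subst h2_0
          simp [pvALoop, pvRun, chars_endswith_eq, h, List.isPrefixOf, hT, hA, PySem.Dict.get?, Prod.mk.injEq, h0_0, h0_1, h0_2]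
          refine slice_eq2 s 3 _ _ (by omega) (by omega) (by norm_num) (by push_cast; omega)
        simp [pvALoop, pvRun, chars_endswith_eq, h, List.isPrefixOf, hT, hA, PySem.Dict.get?, Prod.mk.injEq, h0_0, h0_1, h0_2, h2_0]
      simp [pvALoop, pvRun, chars_endswith_eq, h, List.isPrefixOf, hT, hA, PySem.Dict.get?, Prod.mk.injEq, h0_0, h0_1, h0_2, h1_0]
    by_cases h0_4 : 'B' = a
    · subst h0_4
      by_cases h1_0 : 'N' = b
      · subst h1_0
        by_cases h2_0 : 'B' = c
        · subst h2_0
          simp [pvALoop, pvRun, chars_endswith_eq, h, List.isPrefixOf, hT, hA, PySem.Dict.get?, Prod.mk.injEq, h0_0, h0_1, h0_2, h0_3]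
          refine slice_eq2 s 3 _ _ (by omega) (by omega) (by norm_num) (by push_cast; omega)
        simp [pvALoop, pvRun, chars_endswith_eq, h, List.isPrefixOf, hT, hA, PySem.Dict.get?, Prod.mk.injEq, h0_0, h0_1, h0_2, h0_3, h2_0]
      simp [pvALoop, pvRun, chars_endswith_eq, h, List.isPrefixOf, hT, hA, PySem.Dict.get?, Prod.mk.injEq, h0_0, h0_1, h0_2, h0_3, h1_0]
    by_cases h0_5 : 'R' = a
    · subst h0_5
      by_cases h1_0 : 'U' = b
      · subst h1_0
        by_cases h2_0 : 'E' = c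
        · subst h2_0
          simp [pvALoop, pvRun, chars_endswith_eq, h, List.isPrefixOf, hT, hA, PySem.Dict.get?, Prod.mk.injEq, h0_0, h0_1, h0_2, h0_3, h0_4]
          refine slice_eq2 s 3 _ _ (by omega) (by omega) (by norm_num) (by push_cast; omega)
        simp [pvALoop, pvRun, chars_endswith_eq, h, List.isPrefixOf, hT, hA, PySem.Dict.get?, Prod.mk.injEq, h0_0, h0_1, h0_2, h0_3, h0_4, h2_0]
      simp [pvALoop, pvRun, chars_endswith_eq, h, List.isPrefixOf, hT, hA, PySem.Dict.get?, Prod.mk.injEq, h0_0, h0_1, h0_2, h0_3, h0_4, h1_0]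
    simp [pvALoop, pvRun, chars_endswith_eq, h, List.isPrefixOf, hT, hA, PySem.Dict.get?, Prod.mk.injEq, h0_0, h0_1, h0_2, h0_3, h0_4, h0_5]
  · have hL := congrArg List.length h
    simp at hL
    by_cases h0_0 : 'T' = a
    · subst h0_0
      by_cases h1_0 : 'D' = b
      · subst h1_0
        by_cases h2_0 : 'S' = c
        · subst h2_0
          by_cases h3_0 : 'U' = d
          · subst h3_0
            simp [pvALoop, pvRun, chars_endswith_eq, h, List.isPrefixOf, hT, hA, PySem.Dict.get?, Prod.mk.injEq]
            refine slice_eq2 s 4 _ _ (by omega) (by omega) (by norm_num) (by push_cast; omega)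
          simp [pvALoop, pvRun, chars_endswith_eq, h, List.isPrefixOf, hT, hA, PySem.Dict.get?, Prod.mk.injEq, h3_0]
        simp [pvALoop, pvRun, chars_endswith_eq, h, List.isPrefixOf, hT, hA, PySem.Dict.get?, Prod.mk.injEq, h2_0]
      simp [pvALoop, pvRun, chars_endswith_eq, h, List.isPrefixOf, hT, hA, PySem.Dict.get?, Prod.mk.injEq, h1_0]
    by_cases h0_1 : 'C' = a
    · subst h0_1
      by_cases h1_0 : 'D' = b
      · subst h1_0
        by_cases h2_0 : 'S' = c
        · subst h2_0
          by_cases h3_0 : 'U' = d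
          · subst h3_0
            simp [pvALoop, pvRun, chars_endswith_eq, h, List.isPrefixOf, hT, hA, PySem.Dict.get?, Prod.mk.injEq, h0_0]
            refine slice_eq2 s 4 _ _ (by omega) (by omega) (by norm_num) (by push_cast; omega)
          simp [pvALoop, pvRun, chars_endswith_eq, h, List.isPrefixOf, hT, hA, PySem.Dict.get?, Prod.mk.injEq, h0_0, h3_0]
        simp [pvALoop, pvRun, chars_endswith_eq, h, List.isPrefixOf, hT, hA, PySem.Dict.get?, Prod.mk.injEq, h0_0, h2_0]
      by_cases h1_1 : 'T' = b
      · subst h1_1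
        by_cases h2_0 : 'B' = c
        · subst h2_0
          simp [pvALoop, pvRun, chars_endswith_eq, h, List.isPrefixOf, hT, hA, PySem.Dict.get?, Prod.mk.injEq, h0_0, h1_0]
          refine slice_eq2 s 3 _ _ (by omega) (by omega) (by norm_num) (by push_cast; omega)
        simp [pvALoop, pvRun, chars_endswith_eq, h, List.isPrefixOf, hT, hA, PySem.Dict.get?, Prod.mk.injEq, h0_0, h1_0, h2_0]
      simp [pvALoop, pvRun, chars_endswith_eq, h, List.isPrefixOf, hT, hA, PySem.Dict.get?, Prod.mk.injEq, h0_0, h1_0, h1_1]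
    by_cases h0_2 : 'D' = a
    · subst h0_2
      by_cases h1_0 : 'S' = b
      · subst h1_0
        by_cases h2_0 : 'U' = c
        · subst h2_0
          simp [pvALoop, pvRun, chars_endswith_eq, h, List.isPrefixOf, hT, hA, PySem.Dict.get?, Prod.mk.injEq, h0_0, h0_1]
          refine slice_eq2 s 3 _ _ (by omega) (by omega) (by norm_num) (by push_cast; omega)
        simp [pvALoop, pvRun, chars_endswith_eq, h, List.isPrefixOf, hT, hA, PySem.Dict.get?, Prod.mk.injEq, h0_0, h0_1, h2_0]
      simp [pvALoop, pvRun, chars_endswith_eq, h, List.isPrefixOf, hT, hA, PySem.Dict.get?, Prod.mk.injEq, h0_0, h0_1, h1_0]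
    by_cases h0_3 : 'H' = a
    · subst h0_3
      by_cases h1_0 : 'T' = b
      · subst h1_0
        by_cases h2_0 : 'E' = c
        · subst h2_0
          simp [pvALoop, pvRun, chars_endswith_eq, h, List.isPrefixOf, hT, hA, PySem.Dict.get?, Prod.mk.injEq, h0_0, h0_1, h0_2]
          refine slice_eq2 s 3 _ _ (by omega) (by omega) (by norm_num) (by push_cast; omega)
        simp [pvALoop, pvRun, chars_endswith_eq, h, List.isPrefixOf, hT, hA, PySem.Dict.get?, Prod.mk.injEq, h0_0, h0_1, h0_2, h2_0]
      simp [pvALoop, pvRun, chars_endswith_eq, h, List.isPrefixOf, hT, hA, PySem.Dict.get?, Prod.mk.injEq, h0_0, h0_1, h0_2, h1_0]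
    by_cases h0_4 : 'B' = a
    · subst h0_4
      by_cases h1_0 : 'N' = b
      · subst h1_0
        by_cases h2_0 : 'B' = c
        · subst h2_0
          simp [pvALoop, pvRun, chars_endswith_eq, h, List.isPrefixOf, hT, hA, PySem.Dict.get?, Prod.mk.injEq, h0_0, h0_1, h0_2, h0_3]
          refine slice_eq2 s 3 _ _ (by omega) (by omega) (by norm_num) (by push_cast; omega)
        simp [pvALoop, pvRun, chars_endswith_eq, h, List.isPrefixOf, hT, hA, PySem.Dict.get?, Prod.mk.injEq, h0_0, h0_1, h0_2, h0_3, h2_0]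
      simp [pvALoop, pvRun, chars_endswith_eq, h, List.isPrefixOf, hT, hA, PySem.Dict.get?, Prod.mk.injEq, h0_0, h0_1, h0_2, h0_3, h1_0]
    by_cases h0_5 : 'R' = a
    · subst h0_5
      by_cases h1_0 : 'U' = b
      · subst h1_0
        by_cases h2_0 : 'E' = c
        · subst h2_0
          simp [pvALoop, pvRun, chars_endswith_eq, h, List.isPrefixOf, hT, hA, PySem.Dict.get?, Prod.mk.injEq, h0_0, h0_1, h0_2, h0_3, h0_4]
          refine slice_eq2 s 3 _ _ (by omega) (by omega) (by norm_num) (by push_cast; omega)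
        simp [pvALoop, pvRun, chars_endswith_eq, h, List.isPrefixOf, hT, hA, PySem.Dict.get?, Prod.mk.injEq, h0_0, h0_1, h0_2, h0_3, h0_4, h2_0]
      simp [pvALoop, pvRun, chars_endswith_eq, h, List.isPrefixOf, hT, hA, PySem.Dict.get?, Prod.mk.injEq, h0_0, h0_1, h0_2, h0_3, h0_4, h1_0]
    simp [pvALoop, pvRun, chars_endswith_eq, h, List.isPrefixOf, hT, hA, PySem.Dict.get?, Prod.mk.injEq, h0_0, h0_1, h0_2, h0_3, h0_4, h0_5]


-- ===== VERDICT (by name: the statement is the Claim_ definition above) =====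
theorem split_symbol_py_spec : Claim_equal_split_symbol_py := by
  intro symbol _
  unfold Spec_split_symbol_py split_symbol_py split_symbol_py_alt
  exact main_eq _
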